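-- pv_equiv track=rewrite | github.com/stannrodriguez/CTC-Solutions | Solutions/1-ArraysAndStrings/1.5-oneAway.py | checkAddOne
-- ===== SOURCE A (Python) =====
-- def checkAddOne(longerS, shorterS):
-- 	l = list(longerS)
-- 	for char in shorterS:
-- 		if char in l:
-- 			l.remove(char)
-- 		else:
-- 			return False
-- 	return True
-- ===== SOURCE B (Python) =====
-- def checkAddOne(longerS, shorterS):
--     s = sorted(longerS)
--     t = sorted(shorterS)
--     i = 0
--     for ch in t:
--         while i < len(s) and s[i] < ch:
--             i += 1
--         if i == len(s) or s[i] != ch: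
--             return False
--         i += 1
--     return True
-- ===== Notes on version B (the rewrite author's own statement) =====
-- stated objective: faster
-- what changed: B sorts both strings once and decides the sub-multiset test by a single merge walk with one pointer, instead of A's repeated linear 'in'/remove scans over a shrinking list.
import Mathlib
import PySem

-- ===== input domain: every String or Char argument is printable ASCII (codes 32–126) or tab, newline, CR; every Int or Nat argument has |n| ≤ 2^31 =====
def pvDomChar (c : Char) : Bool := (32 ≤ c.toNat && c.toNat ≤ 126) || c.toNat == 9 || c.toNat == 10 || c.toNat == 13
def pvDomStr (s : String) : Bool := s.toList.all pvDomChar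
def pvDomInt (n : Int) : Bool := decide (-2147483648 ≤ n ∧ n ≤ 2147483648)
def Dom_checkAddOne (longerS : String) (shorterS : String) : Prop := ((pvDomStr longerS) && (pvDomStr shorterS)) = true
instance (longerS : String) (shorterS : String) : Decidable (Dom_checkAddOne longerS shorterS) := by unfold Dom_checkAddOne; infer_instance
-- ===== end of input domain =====

-- B sorts both strings once and decides the sub-multiset test with a single merge walk (objective: faster).

-- ===== PORT A =====
-- the loop 'for char in shorterS: if char in l: l.remove(char) else: return False'
def checkAddOneLoopA : List Char → List Char → Bool
  | [], _ => true
  | c :: cs, l => if l.contains c then checkAddOneLoopA cs (l.erase c) else false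

def checkAddOne (longerS : String) (shorterS : String) : Bool :=
  checkAddOneLoopA shorterS.toList longerS.toList

-- ===== PORT B =====
-- the inner 'while i < len(s) and s[i] < ch: i += 1'
def checkAddOneAdv (s : List Char) (ch : Char) (i : Nat) : Nat :=
  if h : i < s.length then
    if s[i] < ch then checkAddOneAdv s ch (i + 1) else i
  else i
termination_by s.length - i

-- the outer 'for ch in t: …; if i == len(s) or s[i] != ch: return False; i += 1'
def checkAddOneLoopB (s : List Char) : List Char → Nat → Bool
  | [], _ => true
  | ch :: ts, i =>
      let j := checkAddOneAdv s ch i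
      if h : j < s.length then
        if s[j] = ch then checkAddOneLoopB s ts (j + 1) else false
      else false

def checkAddOne_alt (longerS : String) (shorterS : String) : Bool :=
  let s := PySem.List.sorted longerS.toList (fun x => x) false
  let t := PySem.List.sorted shorterS.toList (fun x => x) false
  checkAddOneLoopB s t 0

-- ===== PRECONDITION & SPEC =====
def Spec_checkAddOne (longerS : String) (shorterS : String) (out : Bool) : Prop := out = checkAddOne_alt longerS shorterS
instance (longerS : String) (shorterS : String) (out : Bool) : Decidable (Spec_checkAddOne longerS shorterS out) := by unfold Spec_checkAddOne; infer_instance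

-- ===== CLAIM (what is proved, stated in full; the proofs are below) =====
def Claim_equal_checkAddOne : Prop := ∀ (longerS : String) (shorterS : String), Dom_checkAddOne longerS shorterS → Spec_checkAddOne longerS shorterS (checkAddOne longerS shorterS)

-- ===== LEMMAS AND PROOFS =====

-- A's loop decides the sub-multiset relation
theorem loopA_iff_count (cs : List Char) :
    ∀ l : List Char, checkAddOneLoopA cs l = true ↔ ∀ x : Char, cs.count x ≤ l.count x := by
  induction cs with
  | nil => intro l; simp [checkAddOneLoopA]
  | cons c cs ih =>
    intro l
    simp only [checkAddOneLoopA]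
    by_cases hmem : l.contains c
    · have hpos : 0 < l.count c := List.count_pos_iff.mpr (by simpa using hmem)
      simp only [hmem, if_true, ih]
      constructor
      · intro h x
        have hx := h x
        rcases eq_or_ne x c with rfl | hne
        · rw [List.count_erase_self] at hx
          simp only [List.count_cons_self]; omega
        · rw [List.count_erase_of_ne hne] at hx
          simp only [List.count_cons, beq_iff_eq, if_neg (Ne.symm hne)]; omega
      · intro h x
        have hx := h x
        rcases eq_or_ne x c with rfl | hne
        · simp only [List.count_cons_self] at hx
          rw [List.count_erase_self]; omega
        · simp only [List.count_cons, beq_iff_eq, if_neg (Ne.symm hne)] at hx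
          rw [List.count_erase_of_ne hne]; omega
    · have hz : l.count c = 0 := by rw [List.count_eq_zero]; simpa using hmem
      simp only [hmem]
      constructor
      · intro h; cases h
      · intro h
        have := h c
        rw [List.count_cons_self, hz] at this
        omega

-- suffix view of B's merge walk
def checkAddOneMrg : List Char → List Char → Bool
  | _, [] => true
  | s, ch :: ts =>
      match s.dropWhile (fun x => decide (x < ch)) with
      | [] => false
      | x :: rest => if x = ch then checkAddOneMrg rest ts else false

theorem adv_drop (s : List Char) (ch : Char) (i : Nat) :
    s.drop (checkAddOneAdv s ch i) = (s.drop i).dropWhile (fun x => decide (x < ch)) := by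
  fun_induction checkAddOneAdv s ch i with
  | case1 i h hlt ih =>
      rw [List.drop_eq_getElem_cons h, List.dropWhile_cons]
      simp only [hlt, decide_true]
      exact ih
  | case2 i h hlt =>
      rw [List.drop_eq_getElem_cons h, List.dropWhile_cons]
      simp [hlt]
  | case3 i h =>
      have : s.drop i = [] := List.drop_eq_nil_of_le (by omega)
      simp [this]

theorem loopB_eq_mrg (ts : List Char) :
    ∀ (s : List Char) (i : Nat), checkAddOneLoopB s ts i = checkAddOneMrg (s.drop i) ts := by
  induction ts with
  | nil => intro s i; rfl
  | cons ch ts ih =>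
    intro s i
    simp only [checkAddOneLoopB, checkAddOneMrg]
    rw [← adv_drop s ch i]
    by_cases h : checkAddOneAdv s ch i < s.length
    · rw [List.drop_eq_getElem_cons h]
      simp only [h, dif_pos]
      by_cases he : s[checkAddOneAdv s ch i] = ch
      · simp [he, ih]
      · simp [he]
    · have hnil : s.drop (checkAddOneAdv s ch i) = [] := List.drop_eq_nil_of_le (by omega)
      simp [h, hnil]

theorem head_dropWhile_false {p : Char → Bool} :
    ∀ {l : List Char} {x : Char} {rest : List Char}, l.dropWhile p = x :: rest → p x = false := by
  intro l
  induction l with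
  | nil => intro x rest h; cases h
  | cons a l ih =>
    intro x rest h
    rw [List.dropWhile_cons] at h
    by_cases ha : p a
    · rw [if_pos ha] at h; exact ih h
    · rw [if_neg ha] at h
      cases h
      simpa using ha

-- for sorted s and sorted t, the merge walk decides the sub-multiset relation
theorem mrg_iff_count (t : List Char) :
    ∀ s : List Char, s.Pairwise (· ≤ ·) → t.Pairwise (· ≤ ·) →
      (checkAddOneMrg s t = true ↔ ∀ x : Char, t.count x ≤ s.count x) := by
  induction t with
  | nil => intro s _ _; simp [checkAddOneMrg]
  | cons ch ts ih =>
    intro s hs ht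
    have hts : ts.Pairwise (· ≤ ·) := (List.pairwise_cons.mp ht).2
    have htsge : ∀ y ∈ ts, ch ≤ y := (List.pairwise_cons.mp ht).1
    -- count in s of a character not below ch lives entirely in the dropWhile part
    have hcnt : ∀ c : Char, ¬ c < ch →
        s.count c = (s.dropWhile (fun x => decide (x < ch))).count c := by
      intro c hc
      conv_lhs => rw [← List.takeWhile_append_dropWhile (p := fun x => decide (x < ch)) (l := s)]
      rw [List.count_append]
      have : c ∉ s.takeWhile (fun x => decide (x < ch)) := by
        intro hmem
        have := List.mem_takeWhile_imp hmem
        simp only [decide_eq_true_eq] at this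
        exact hc this
      rw [List.count_eq_zero.mpr this, Nat.zero_add]
    -- a character below ch does not occur in ch :: ts
    have hnot : ∀ c : Char, c < ch → (ch :: ts).count c = 0 := by
      intro c hc
      rw [List.count_eq_zero]
      intro hmem
      rcases List.mem_cons.mp hmem with rfl | hmem
      · exact absurd hc (lt_irrefl _)
      · exact absurd hc (not_lt.mpr (htsge _ hmem))
    rcases hdw : s.dropWhile (fun x => decide (x < ch)) with _ | ⟨x, rest⟩
    · -- no element ≥ ch left: ch cannot be matched
      simp only [checkAddOneMrg, hdw]
      constructor
      · intro h; cases h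
      · intro h
        have h1 := h ch
        have h2 := hcnt ch (lt_irrefl _)
        rw [hdw] at h2
        simp only [List.count_cons_self, List.count_nil] at h1 h2
        omega
    · have hxge : ¬ x < ch := by
        have := head_dropWhile_false hdw
        simpa using this
      have hrest : (x :: rest).Pairwise (· ≤ ·) := by
        have hsub : List.Sublist (s.dropWhile (fun x => decide (x < ch))) s :=
          List.dropWhile_sublist _
        rw [hdw] at hsub
        exact hs.sublist hsub
      by_cases hx : x = ch
      · subst hx
        simp only [checkAddOneMrg, hdw, if_true]
        rw [ih rest (List.pairwise_cons.mp hrest).2 hts]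
        constructor
        · intro h c
          by_cases hc : c < x
          · rw [hnot c hc]; omega
          · rw [hcnt c hc, hdw]
            have := h c
            rcases eq_or_ne c x with rfl | hne
            · simp only [List.count_cons_self]; omega
            · simp only [List.count_cons, beq_iff_eq, if_neg (Ne.symm hne)]; omega
        · intro h c
          by_cases hc : c < x
          · have : c ∉ ts := by
              intro hmem
              exact absurd hc (not_lt.mpr (htsge _ hmem))
            rw [List.count_eq_zero.mpr this]; omega
          · have h1 := h c
            rw [hcnt c hc, hdw] at h1
            rcases eq_or_ne c x with rfl | hne
            · simp only [List.count_cons_self] at h1 ⊢; omega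
            · simp only [List.count_cons, beq_iff_eq, if_neg (Ne.symm hne)] at h1 ⊢; omega
      · simp only [checkAddOneMrg, hdw, if_neg hx]
        constructor
        · intro h; cases h
        · intro h
          have h1 := h ch
          have h2 := hcnt ch (lt_irrefl _)
          rw [hdw] at h2
          have hchrest : ch ∉ x :: rest := by
            intro hmem
            rcases List.mem_cons.mp hmem with rfl | hmem
            · exact hx rfl
            · have hxle : x ≤ ch := (List.pairwise_cons.mp hrest).1 _ hmem
              have : x < ch := lt_of_le_of_ne hxle hx
              exact hxge this
          rw [List.count_eq_zero.mpr hchrest] at h2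
          simp only [List.count_cons_self] at h1
          omega

-- ===== VERDICT (by name: the statement is the Claim_ definition above) =====
theorem checkAddOne_spec : Claim_equal_checkAddOne := by
  intro L S _
  unfold Spec_checkAddOne checkAddOne checkAddOne_alt
  rw [loopB_eq_mrg, List.drop_zero]
  have hs : (PySem.List.sorted L.toList (fun x => x) false).Pairwise (· ≤ ·) := by
    simpa using PySem.List.sorted_pairwise (xs := L.toList) (key := fun x => x)
  have ht : (PySem.List.sorted S.toList (fun x => x) false).Pairwise (· ≤ ·) := by
    simpa using PySem.List.sorted_pairwise (xs := S.toList) (key := fun x => x)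
  have hB := mrg_iff_count (PySem.List.sorted S.toList (fun x => x) false)
      (PySem.List.sorted L.toList (fun x => x) false) hs ht
  have hA := loopA_iff_count S.toList L.toList
  have hpl : ∀ x : Char, (PySem.List.sorted L.toList (fun y => y) false).count x = L.toList.count x :=
    fun x => (PySem.List.sorted_perm (xs := L.toList) (key := fun y => y) (rev := false)).count_eq x
  have hps : ∀ x : Char, (PySem.List.sorted S.toList (fun y => y) false).count x = S.toList.count x :=
    fun x => (PySem.List.sorted_perm (xs := S.toList) (key := fun y => y) (rev := false)).count_eq x
  have : checkAddOneLoopA S.toList L.toList = true ↔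
      checkAddOneMrg (PySem.List.sorted L.toList (fun x => x) false)
        (PySem.List.sorted S.toList (fun x => x) false) = true := by
    rw [hA, hB]
    constructor
    · intro h x; rw [hpl, hps]; exact h x
    · intro h x
      have := h x
      rwa [hpl, hps] at this
  rcases Bool.eq_false_or_eq_true (checkAddOneLoopA S.toList L.toList) with hb | hb <;>
    rcases Bool.eq_false_or_eq_true (checkAddOneMrg (PySem.List.sorted L.toList (fun x => x) false)
      (PySem.List.sorted S.toList (fun x => x) false)) with hc | hc <;>
    simp_all
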